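-- pv_equiv track=rewrite | github.com/kodevadam/Pak | pak/c2pak/idiom_detector.py | _match_enum_case
-- ===== SOURCE A (Python) =====
-- from typing import Dict, List, Optional, Set, Tuple
--
-- def _match_enum_case(field_name: str,
--                      enum_values: List[Tuple[str, Optional[int]]]) -> str:
--     """Find the best matching enum case name for a union field name."""
--     # Try exact match first
--     for ev_name, _ in enum_values:
--         if ev_name == field_name or ev_name == field_name.lower():
--             return ev_name
--     # Try partial match
--     for ev_name, _ in enum_values:
--         if field_name in ev_name or ev_name in field_name:
--             return ev_name
--     return field_name.lower()
-- ===== SOURCE B (Python) =====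
-- from typing import List, Optional, Tuple
--
-- def _match_enum_case(field_name: str,
--                      enum_values: List[Tuple[str, Optional[int]]]) -> str:
--     """Single pass: return on the first exact match; remember the first
--     partial match and fall back to it (or to field_name.lower()) at the end."""
--     lowered = field_name.lower()
--     partial = None
--     for ev_name, _ in enum_values:
--         if ev_name == field_name or ev_name == lowered:
--             return ev_name
--         if partial is None and (field_name in ev_name or ev_name in field_name):
--             partial = ev_name
--     return partial if partial is not None else lowered
-- ===== Notes on version B (the rewrite author's own statement) =====
-- stated objective: simpler
-- what changed: Replaces A's two sequential scans of enum_values by one pass that returns on the first exact match and carries the first partial match as an accumulator for the fallback, with field_name.lower() computed once instead of per element.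
import Mathlib
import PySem

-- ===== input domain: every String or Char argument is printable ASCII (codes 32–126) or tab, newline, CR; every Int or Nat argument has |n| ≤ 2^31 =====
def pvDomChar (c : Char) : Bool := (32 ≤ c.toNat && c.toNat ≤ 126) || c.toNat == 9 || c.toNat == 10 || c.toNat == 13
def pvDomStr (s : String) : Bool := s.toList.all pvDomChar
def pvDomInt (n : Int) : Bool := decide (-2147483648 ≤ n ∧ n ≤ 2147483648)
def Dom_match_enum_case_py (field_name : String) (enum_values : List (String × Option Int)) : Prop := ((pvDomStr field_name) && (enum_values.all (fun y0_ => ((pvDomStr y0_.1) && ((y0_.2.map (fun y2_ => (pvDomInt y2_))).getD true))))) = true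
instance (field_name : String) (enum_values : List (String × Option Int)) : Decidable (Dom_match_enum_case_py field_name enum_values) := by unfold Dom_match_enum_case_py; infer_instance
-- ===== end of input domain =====

-- B replaces A's two sequential scans by one pass that returns on the first exact
-- match and carries the first partial match for the fallback (objective: simpler).

-- ===== PORT A =====
-- first enum name that matches exactly (A's first loop)
def pvExactA (field_name : String) : List (String × Option Int) → Option String
  | [] => none
  | (ev_name, _) :: t =>
    if ev_name = field_name ∨ ev_name = PySem.Str.lower field_name then some ev_name
    else pvExactA field_name t

-- first enum name that matches partially (A's second loop)
def pvPartialA (field_name : String) : List (String × Option Int) → Option String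
  | [] => none
  | (ev_name, _) :: t =>
    if PySem.Str.isIn field_name ev_name ∨ PySem.Str.isIn ev_name field_name then some ev_name
    else pvPartialA field_name t

def match_enum_case_py (field_name : String) (enum_values : List (String × Option Int)) : String :=
  match pvExactA field_name enum_values with
  | some e => e
  | none =>
    match pvPartialA field_name enum_values with
    | some p => p
    | none => PySem.Str.lower field_name

-- ===== PORT B =====
-- B's single loop; `part` is the `partial` variable
def pvLoopB (field_name lowered : String) : List (String × Option Int) → Option String → String
  | [], part => part.getD lowered
  | (ev_name, _) :: t, part =>
    if ev_name = field_name ∨ ev_name = lowered then ev_name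
    else pvLoopB field_name lowered t
      (if part = none ∧ (PySem.Str.isIn field_name ev_name ∨ PySem.Str.isIn ev_name field_name)
       then some ev_name else part)

def match_enum_case_py_alt (field_name : String) (enum_values : List (String × Option Int)) : String :=
  pvLoopB field_name (PySem.Str.lower field_name) enum_values none

-- ===== PRECONDITION & SPEC =====
def Spec_match_enum_case_py (field_name : String) (enum_values : List (String × Option Int)) (out : String) : Prop := out = match_enum_case_py_alt field_name enum_values
instance (field_name : String) (enum_values : List (String × Option Int)) (out : String) : Decidable (Spec_match_enum_case_py field_name enum_values out) := by unfold Spec_match_enum_case_py; infer_instance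

-- ===== CLAIM (what is proved, stated in full; the proofs are below) =====
def Claim_equal_match_enum_case_py : Prop := ∀ (field_name : String) (enum_values : List (String × Option Int)), Dom_match_enum_case_py field_name enum_values → Spec_match_enum_case_py field_name enum_values (match_enum_case_py field_name enum_values)

-- ===== LEMMAS AND PROOFS =====
-- B's single loop equals A's two scans, for any accumulator state
lemma pvLoopB_eq (field_name : String) (ev : List (String × Option Int)) (part : Option String) :
    pvLoopB field_name (PySem.Str.lower field_name) ev part =
      match pvExactA field_name ev with
      | some e => e
      | none =>
        match part with
        | some p => p
        | none =>
          match pvPartialA field_name ev with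
          | some q => q
          | none => PySem.Str.lower field_name := by
  induction ev generalizing part with
  | nil => cases part <;> rfl
  | cons hd t ih =>
    obtain ⟨n, v⟩ := hd
    by_cases hx : n = field_name ∨ n = PySem.Str.lower field_name
    · rw [pvLoopB, if_pos hx, pvExactA, if_pos hx]
    · cases part with
      | none =>
        by_cases hp : PySem.Str.isIn field_name n = true ∨ PySem.Str.isIn n field_name = true
        · rw [pvLoopB, if_neg hx, if_pos ⟨rfl, hp⟩, ih, pvExactA, if_neg hx,
            pvPartialA, if_pos hp]
        · rw [pvLoopB, if_neg hx, if_neg (fun h => hp h.2), ih, pvExactA, if_neg hx,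
            pvPartialA, if_neg hp]
      | some p =>
        rw [pvLoopB, if_neg hx, if_neg (by simp), ih,
          pvExactA, if_neg hx]

-- ===== VERDICT (by name: the statement is the Claim_ definition above) =====
theorem match_enum_case_py_spec : Claim_equal_match_enum_case_py := by
  intro field_name enum_values _
  unfold Spec_match_enum_case_py match_enum_case_py match_enum_case_py_alt
  rw [pvLoopB_eq]
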